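-- pv_equiv track=rewrite | github.com/cyc6221/I-want-big-John | research/638/lib_dataset.py | build_main_stats
-- ===== SOURCE A (Python) =====
-- MIN_NUMBER = 1
--
-- MAX_NUMBER = 38
--
-- RECENT_WINDOWS = (30, 60, 120)
--
-- def build_main_stats(draws: list[dict]) -> list[dict]:
--     total_draws = len(draws)
--     counts = {n: 0 for n in range(MIN_NUMBER, MAX_NUMBER + 1)}
--     recent_counts = {
--         window: {n: 0 for n in range(MIN_NUMBER, MAX_NUMBER + 1)}
--         for window in RECENT_WINDOWS
--     }
--     last_seen_index = {n: None for n in range(MIN_NUMBER, MAX_NUMBER + 1)}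
--
--     for index, draw in enumerate(draws):
--         numbers = set(draw["numbers"])
--         for n in numbers:
--             counts[n] += 1
--             last_seen_index[n] = index
--
--         remaining = total_draws - index
--         for window in RECENT_WINDOWS:
--             if remaining <= window:
--                 for n in numbers:
--                     recent_counts[window][n] += 1
--
--     stats = []
--     for n in range(MIN_NUMBER, MAX_NUMBER + 1):
--         last_seen = last_seen_index[n]
--         draws_ago = total_draws - 1 - last_seen if last_seen is not None else total_draws
--         stats.append(
--             {
--                 "number": n,
--                 "total_count": counts[n],
--                 "recent_30_count": recent_counts[30][n],
--                 "recent_60_count": recent_counts[60][n],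
--                 "recent_120_count": recent_counts[120][n],
--                 "last_seen_draws_ago": draws_ago,
--             }
--         )
--     return stats
-- ===== SOURCE B (Python) =====
-- MIN_NUMBER = 1
--
-- MAX_NUMBER = 38
--
-- RECENT_WINDOWS = (30, 60, 120)
--
-- def build_main_stats(draws: list[dict]) -> list[dict]:
--     total = len(draws)
--
--     def hits(seq, n):
--         return sum(1 for d in seq if n in d["numbers"])
--
--     stats = []
--     for n in range(MIN_NUMBER, MAX_NUMBER + 1):
--         seen = [i for i, d in enumerate(draws) if n in d["numbers"]]
--         draws_ago = total - 1 - seen[-1] if seen else total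
--         stats.append(
--             {
--                 "number": n,
--                 "total_count": hits(draws, n),
--                 "recent_30_count": hits(draws[-30:], n),
--                 "recent_60_count": hits(draws[-60:], n),
--                 "recent_120_count": hits(draws[-120:], n),
--                 "last_seen_draws_ago": draws_ago,
--             }
--         )
--     return stats
-- ===== Notes on version B (the rewrite author's own statement) =====
-- stated objective: simpler
-- what changed: B replaces A's draw-major single pass that threads three mutable dicts (counts, per-window recent counts, last-seen index over keys 1..38) by a number-major decomposition with no dicts at all: for each number it counts the draws containing it, counts hits in the slices draws[-30:], draws[-60:], draws[-120:] (equivalent to A's 'remaining <= window' test), and reads the last occurrence index from a filtered enumerate.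
import Mathlib
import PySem

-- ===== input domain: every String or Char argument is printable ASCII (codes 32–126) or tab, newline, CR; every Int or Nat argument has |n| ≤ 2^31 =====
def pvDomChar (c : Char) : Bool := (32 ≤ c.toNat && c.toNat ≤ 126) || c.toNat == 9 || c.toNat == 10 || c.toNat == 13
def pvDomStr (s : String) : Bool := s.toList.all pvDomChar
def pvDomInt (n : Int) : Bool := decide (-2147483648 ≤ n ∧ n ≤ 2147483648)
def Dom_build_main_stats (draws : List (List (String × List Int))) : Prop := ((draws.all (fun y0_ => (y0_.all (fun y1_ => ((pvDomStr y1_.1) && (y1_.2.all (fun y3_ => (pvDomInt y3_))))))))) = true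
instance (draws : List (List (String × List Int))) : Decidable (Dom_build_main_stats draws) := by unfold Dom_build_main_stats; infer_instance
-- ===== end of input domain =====

-- B replaces A's draw-major pass over three count/recency dicts by a dict-free number-major
-- decomposition (count over the whole list, over the slices draws[-w:], and a filtered enumerate
-- for the last occurrence); objective: simpler.

-- ===== PORT A =====
-- the state threaded by A's main loop: (counts, recent_counts, last_seen_index)
abbrev PVStateA := PySem.Dict Int Int × PySem.Dict Int (PySem.Dict Int Int) × PySem.Dict Int (Option Int)

-- the body of A's 'for index, draw in enumerate(draws)' loop, step for step
def pvStepA (total_draws : Int) (s : PVStateA) (p : Int × List (String × List Int)) : PVStateA :=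
  -- numbers = set(draw["numbers"]); a missing "numbers" key (KeyError) is excluded by Pre_
  let numbers : PySem.Set Int := PySem.Set.ofList ((PySem.Dict.get? (PySem.Dict.mk p.2) "numbers").getD [])
  -- for n in numbers: counts[n] += 1; last_seen_index[n] = index
  -- (Python raises KeyError on counts[n] for n outside 1..38 — excluded by Pre_; modify with
  -- default 0 is exact on the keys 1..38 that Pre_ admits)
  let cl := numbers.foldl
    (fun (s2 : PySem.Dict Int Int × PySem.Dict Int (Option Int)) n =>
      (s2.1.modify n 0 (· + 1), s2.2.insert n (some p.1))) (s.1, s.2.2)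
  let remaining := total_draws - p.1
  let recent := ([30, 60, 120] : List Int).foldl
    (fun r w =>
      if remaining ≤ w then
        r.modify w PySem.Dict.empty
          (fun inner => numbers.foldl (fun d' n => d'.modify n 0 (· + 1)) inner)
      else r) s.2.1
  (cl.1, recent, cl.2)

def build_main_stats (draws : List (List (String × List Int))) : List (List (String × Int)) :=
  let total_draws : Int := PySem.List.len draws
  let counts : PySem.Dict Int Int :=
    (PySem.List.pyRange 1 (38 + 1) 1).foldl (fun d n => d.insert n 0) PySem.Dict.empty
  let recent_counts : PySem.Dict Int (PySem.Dict Int Int) :=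
    ([30, 60, 120] : List Int).foldl
      (fun d w =>
        d.insert w ((PySem.List.pyRange 1 (38 + 1) 1).foldl (fun d' n => d'.insert n 0) PySem.Dict.empty))
      PySem.Dict.empty
  let last_seen_index : PySem.Dict Int (Option Int) :=
    (PySem.List.pyRange 1 (38 + 1) 1).foldl (fun d n => d.insert n none) PySem.Dict.empty
  let st :=
    (PySem.List.enumerate draws 0).foldl (pvStepA total_draws)
      (counts, recent_counts, last_seen_index)
  (PySem.List.pyRange 1 (38 + 1) 1).foldl
    (fun stats n =>
      let last_seen := st.2.2.getD n none
      let draws_ago := match last_seen with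
        | some ls => total_draws - 1 - ls
        | none => total_draws
      stats ++ [[("number", n), ("total_count", st.1.getD n 0),
                 ("recent_30_count", (st.2.1.getD 30 PySem.Dict.empty).getD n 0),
                 ("recent_60_count", (st.2.1.getD 60 PySem.Dict.empty).getD n 0),
                 ("recent_120_count", (st.2.1.getD 120 PySem.Dict.empty).getD n 0),
                 ("last_seen_draws_ago", draws_ago)]])
    []

-- ===== PORT B =====
-- n in d["numbers"] (a missing "numbers" key raises KeyError in B too — excluded by Pre_)
def pvContains (d : List (String × List Int)) (n : Int) : Bool :=
  ((PySem.Dict.get? (PySem.Dict.mk d) "numbers").getD []).contains n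

-- hits(seq, n) = sum(1 for d in seq if n in d["numbers"])
def pvHits (seq : List (List (String × List Int))) (n : Int) : Int :=
  ((seq.filter (fun d => pvContains d n)).length : Int)

def build_main_stats_alt (draws : List (List (String × List Int))) : List (List (String × Int)) :=
  let total : Int := PySem.List.len draws
  (PySem.List.pyRange 1 (38 + 1) 1).map (fun n =>
    let seen := ((PySem.List.enumerate draws 0).filter (fun p => pvContains p.2 n)).map (fun p => p.1)
    let draws_ago := match seen.getLast? with
      | some i => total - 1 - i
      | none => total
    [("number", n), ("total_count", pvHits draws n),
     ("recent_30_count", pvHits (PySem.List.slice draws (some (-30)) none) n),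
     ("recent_60_count", pvHits (PySem.List.slice draws (some (-60)) none) n),
     ("recent_120_count", pvHits (PySem.List.slice draws (some (-120)) none) n),
     ("last_seen_draws_ago", draws_ago)])

-- ===== PRECONDITION & SPEC =====
-- Pre_ excludes exactly the inputs where the Python A raises: a draw without a "numbers" key
-- (KeyError on draw["numbers"]) or a drawn number outside 1..38 (KeyError on the count dicts).
def Pre_build_main_stats (draws : List (List (String × List Int))) : Prop :=
  ∀ d ∈ draws, (PySem.Dict.get? (PySem.Dict.mk d) "numbers").isSome = true ∧
    ∀ m ∈ (PySem.Dict.get? (PySem.Dict.mk d) "numbers").getD [], 1 ≤ m ∧ m ≤ 38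

instance (draws : List (List (String × List Int))) : Decidable (Pre_build_main_stats draws) := by
  unfold Pre_build_main_stats; infer_instance

def pvWitness_build_main_stats : (List (List (String × List Int))) :=
  [[("numbers", [1, 5, 5])], [("numbers", [])], [("numbers", [38, 2])]]

def Spec_build_main_stats (draws : List (List (String × List Int))) (out : List (List (String × Int))) : Prop := out = build_main_stats_alt draws
instance (draws : List (List (String × List Int))) (out : List (List (String × Int))) : Decidable (Spec_build_main_stats draws out) := by unfold Spec_build_main_stats; infer_instance

-- ===== CLAIM (what is proved, stated in full; the proofs are below) =====
def Claim_equal_build_main_stats : Prop := ∀ (draws : List (List (String × List Int))), Dom_build_main_stats draws → Pre_build_main_stats draws → Spec_build_main_stats draws (build_main_stats draws)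

-- ===== LEMMAS AND PROOFS =====

-- count of an element in set(l)
lemma pv_set_count (l : List Int) (n : Int) :
    (PySem.Set.ofList l).count n = if l.contains n then 1 else 0 := by
  by_cases h : n ∈ l
  · simp only [h, List.contains_eq_mem, decide_true, if_true]
    exact List.count_eq_one_of_mem (PySem.Set.nodup_ofList l) ((PySem.Set.mem_ofList l n).2 h)
  · simp only [h, List.contains_eq_mem, decide_false, if_false]
    exact List.count_eq_zero.2 (fun hm => h ((PySem.Set.mem_ofList l n).1 hm))

-- a loop inserting the same value at every key of l
lemma pv_getD_foldl_insert_const {ν : Type} (l : List Int) (v : ν) (d : PySem.Dict Int ν)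
    (n : Int) (df : ν) :
    (l.foldl (fun d x => d.insert x v) d).getD n df = if n ∈ l then v else d.getD n df := by
  induction l generalizing d with
  | nil => simp
  | cons x t ih =>
      simp only [List.foldl_cons, ih, PySem.Dict.getD_insert, List.mem_cons]
      by_cases h1 : n ∈ t <;> by_cases h2 : n = x <;> simp [h1, h2]

-- a last-match loop is the last element of the filtered list
lemma pv_foldl_last {α β : Type} (q : α → Bool) (f : α → β) (l : List α) (init : Option β) :
    l.foldl (fun a p => if q p then some (f p) else a) init
      = Option.or ((l.filter q).map f).getLast? init := by
  induction l using List.reverseRecOn with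
  | nil => simp
  | append_singleton t x ih =>
      by_cases h : q x <;>
        simp [List.foldl_append, ih, List.filter_append, h, List.getLast?_concat]

-- index-threshold filter over enumerate is a filter of the dropped suffix
lemma pv_filter_enum_drop {α : Type} (q : α → Bool) :
    ∀ (ds : List α) (k c : Int),
      ((PySem.List.enumerate ds k).filter (fun p => decide (c ≤ p.1) && q p.2)).length
        = ((ds.drop (c - k).toNat).filter q).length := by
  intro ds
  induction ds with
  | nil => simp [PySem.List.enumerate_nil]
  | cons d t ih =>
      intro k c
      rw [PySem.List.enumerate_cons]
      by_cases h : c ≤ k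
      · have h0 : (c - k).toNat = 0 := by omega
        have h1 : (c - (k + 1)).toNat = 0 := by omega
        have iht := ih (k + 1) c
        rw [h1] at iht
        by_cases hq : q d <;> simp [h, hq, h0, List.filter_cons, iht]
      · have h0 : (c - k).toNat = (c - (k + 1)).toNat + 1 := by omega
        simp [h, h0, List.filter_cons, ih (k + 1) c]

-- A's combined counts/last-seen loop splits into two independent folds
lemma pv_pairfold (l : List Int) (v : Option Int)
    (a : PySem.Dict Int Int) (b : PySem.Dict Int (Option Int)) :
    l.foldl (fun (s2 : PySem.Dict Int Int × PySem.Dict Int (Option Int)) n =>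
        (s2.1.modify n 0 (· + 1), s2.2.insert n v)) (a, b)
      = (l.foldl (fun d n => d.modify n 0 (· + 1)) a, l.foldl (fun d n => d.insert n v) b) := by
  induction l generalizing a b with
  | nil => rfl
  | cons x t ih => simp [ih]

-- append-singleton fold builds a map
lemma pv_foldl_append_map {α β : Type} (f : α → β) (l : List α) (acc : List β) :
    l.foldl (fun s x => s ++ [f x]) acc = acc ++ l.map f := by
  induction l generalizing acc with
  | nil => simp
  | cons x t ih => simp [ih]

-- one pass of A's window loop, read back at window w0
lemma pv_recent_step (r : PySem.Dict Int (PySem.Dict Int Int)) (numbers : List Int)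
    (rem : Int) (w0 n : Int) (hw : w0 = 30 ∨ w0 = 60 ∨ w0 = 120) :
    ((([30, 60, 120] : List Int).foldl
        (fun r w =>
          if rem ≤ w then
            r.modify w PySem.Dict.empty
              (fun inner => numbers.foldl (fun d' m => d'.modify m 0 (· + 1)) inner)
          else r) r).getD w0 PySem.Dict.empty).getD n 0
      = (r.getD w0 PySem.Dict.empty).getD n 0
        + (if rem ≤ w0 then (numbers.count n : Int) else 0) := by
  simp only [List.foldl_cons, List.foldl_nil]
  rcases hw with h | h | h <;> subst h <;>
    by_cases c30 : rem ≤ 30 <;> by_cases c60 : rem ≤ 60 <;> by_cases c120 : rem ≤ 120 <;>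
    first
      | (exfalso; omega)
      | simp [c30, c60, c120, PySem.Dict.getD_modify, PySem.Dict.getD_foldl_modify_add_one]

-- the invariant of A's main loop
lemma pv_inv (T : Int) (ds : List (List (String × List Int))) (k : Int) (s : PVStateA)
    (n w0 : Int) (hw : w0 = 30 ∨ w0 = 60 ∨ w0 = 120) :
    (((PySem.List.enumerate ds k).foldl (pvStepA T) s).1.getD n 0
        = s.1.getD n 0 + ((ds.filter (fun d => pvContains d n)).length : Int))
    ∧ ((((PySem.List.enumerate ds k).foldl (pvStepA T) s).2.1.getD w0 PySem.Dict.empty).getD n 0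
        = (s.2.1.getD w0 PySem.Dict.empty).getD n 0
          + (((PySem.List.enumerate ds k).filter
              (fun p => decide (T - w0 ≤ p.1) && pvContains p.2 n)).length : Int))
    ∧ (((PySem.List.enumerate ds k).foldl (pvStepA T) s).2.2.getD n none
        = (PySem.List.enumerate ds k).foldl
            (fun a p => if pvContains p.2 n then some p.1 else a) (s.2.2.getD n none)) := by
  induction ds generalizing k s with
  | nil => simp [PySem.List.enumerate_nil]
  | cons d t ih =>
      rw [PySem.List.enumerate_cons]
      simp only [List.foldl_cons]
      have hstep1 : (pvStepA T s (k, d)).1.getD n 0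
          = s.1.getD n 0 + (if pvContains d n then 1 else 0) := by
        simp only [pvStepA, pv_pairfold]
        rw [PySem.Dict.getD_foldl_modify_add_one, pv_set_count]
        simp [pvContains]
      have hstep3 : (pvStepA T s (k, d)).2.2.getD n none
          = if pvContains d n then some k else s.2.2.getD n none := by
        simp only [pvStepA, pv_pairfold]
        rw [pv_getD_foldl_insert_const]
        simp [pvContains, PySem.Set.mem_ofList, List.contains_eq_mem]
      have hstep2 : ((pvStepA T s (k, d)).2.1.getD w0 PySem.Dict.empty).getD n 0
          = (s.2.1.getD w0 PySem.Dict.empty).getD n 0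
            + (if T - k ≤ w0 then (if pvContains d n then 1 else 0) else 0) := by
        simp only [pvStepA]
        rw [pv_recent_step _ _ _ _ _ hw, pv_set_count]
        simp [pvContains]
      obtain ⟨ih1, ih2, ih3⟩ := ih (k + 1) (pvStepA T s (k, d))
      refine ⟨?_, ?_, ?_⟩
      · rw [ih1, hstep1, List.filter_cons]
        by_cases h : pvContains d n <;> simp [h] <;> omega
      · rw [ih2, hstep2, List.filter_cons]
        have hiff : (T - k ≤ w0) ↔ (T - w0 ≤ k) := by omega
        by_cases hc : T - w0 ≤ k
        · have hc' : T - k ≤ w0 := hiff.2 hc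
          by_cases h : pvContains d n <;> simp [hc, hc', h] <;> omega
        · have hc' : ¬ (T - k ≤ w0) := fun h => hc (hiff.1 h)
          simp [hc, hc']
      · rw [ih3, hstep3]

-- each zero-initialisation dict reads back 0 / none at every key
lemma pv_counts0 (v : Int) (n : Int) :
    ((PySem.List.pyRange 1 (38 + 1) 1).foldl
      (fun (d : PySem.Dict Int Int) m => d.insert m v) PySem.Dict.empty).getD n v = v := by
  rw [pv_getD_foldl_insert_const]
  simp [PySem.Dict.getD_empty]

lemma pv_last0 (n : Int) :
    ((PySem.List.pyRange 1 (38 + 1) 1).foldl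
      (fun (d : PySem.Dict Int (Option Int)) m => d.insert m none) PySem.Dict.empty).getD n none
      = none := by
  rw [pv_getD_foldl_insert_const]
  simp [PySem.Dict.getD_empty]

lemma pv_recent0 (w0 n : Int) (hw : w0 = 30 ∨ w0 = 60 ∨ w0 = 120) :
    ((([30, 60, 120] : List Int).foldl
        (fun (d : PySem.Dict Int (PySem.Dict Int Int)) w =>
          d.insert w ((PySem.List.pyRange 1 (38 + 1) 1).foldl
            (fun (d' : PySem.Dict Int Int) m => d'.insert m 0) PySem.Dict.empty))
        PySem.Dict.empty).getD w0 PySem.Dict.empty).getD n 0 = 0 := by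
  simp only [List.foldl_cons, List.foldl_nil, PySem.Dict.getD_insert]
  rcases hw with h | h | h <;> subst h <;> norm_num <;> exact pv_counts0 0 n

-- the A-side slice of draws selected by 'remaining <= w' is B's draws[-w:]
lemma pv_recent_eq30 (draws : List (List (String × List Int))) (n : Int) :
    (((PySem.List.enumerate draws 0).filter
        (fun p => decide (PySem.List.len draws - 30 ≤ p.1) && pvContains p.2 n)).length : Int)
      = pvHits (PySem.List.slice draws (some (-30)) none) n := by
  have h : (PySem.List.len draws - 30 - 0).toNat = draws.length - 30 := by
    simp only [PySem.List.len]
    omega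
  rw [pv_filter_enum_drop (fun d => pvContains d n) draws 0 (PySem.List.len draws - 30), h,
      PySem.List.slice_from_neg_ofNat draws 30 (by omega)]
  rfl

lemma pv_recent_eq60 (draws : List (List (String × List Int))) (n : Int) :
    (((PySem.List.enumerate draws 0).filter
        (fun p => decide (PySem.List.len draws - 60 ≤ p.1) && pvContains p.2 n)).length : Int)
      = pvHits (PySem.List.slice draws (some (-60)) none) n := by
  have h : (PySem.List.len draws - 60 - 0).toNat = draws.length - 60 := by
    simp only [PySem.List.len]
    omega
  rw [pv_filter_enum_drop (fun d => pvContains d n) draws 0 (PySem.List.len draws - 60), h,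
      PySem.List.slice_from_neg_ofNat draws 60 (by omega)]
  rfl

lemma pv_recent_eq120 (draws : List (List (String × List Int))) (n : Int) :
    (((PySem.List.enumerate draws 0).filter
        (fun p => decide (PySem.List.len draws - 120 ≤ p.1) && pvContains p.2 n)).length : Int)
      = pvHits (PySem.List.slice draws (some (-120)) none) n := by
  have h : (PySem.List.len draws - 120 - 0).toNat = draws.length - 120 := by
    simp only [PySem.List.len]
    omega
  rw [pv_filter_enum_drop (fun d => pvContains d n) draws 0 (PySem.List.len draws - 120), h,
      PySem.List.slice_from_neg_ofNat draws 120 (by omega)]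
  rfl

-- ===== VERDICT (by name: the statement is the Claim_ definition above) =====
theorem build_main_stats_spec : Claim_equal_build_main_stats := by
  intro draws _ _
  unfold Spec_build_main_stats build_main_stats build_main_stats_alt
  rw [pv_foldl_append_map]
  simp only [List.nil_append]
  apply List.map_congr_left
  intro n _
  obtain ⟨h30a, h30b, h30c⟩ :=
    pv_inv (PySem.List.len draws) draws 0
      ((PySem.List.pyRange 1 (38 + 1) 1).foldl (fun d n => d.insert n 0) PySem.Dict.empty,
       ([30, 60, 120] : List Int).foldl
         (fun d w => d.insert w ((PySem.List.pyRange 1 (38 + 1) 1).foldl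
           (fun d' n => d'.insert n 0) PySem.Dict.empty)) PySem.Dict.empty,
       (PySem.List.pyRange 1 (38 + 1) 1).foldl (fun d n => d.insert n none) PySem.Dict.empty)
      n 30 (by norm_num)
  obtain ⟨-, h60b, -⟩ :=
    pv_inv (PySem.List.len draws) draws 0
      ((PySem.List.pyRange 1 (38 + 1) 1).foldl (fun d n => d.insert n 0) PySem.Dict.empty,
       ([30, 60, 120] : List Int).foldl
         (fun d w => d.insert w ((PySem.List.pyRange 1 (38 + 1) 1).foldl
           (fun d' n => d'.insert n 0) PySem.Dict.empty)) PySem.Dict.empty,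
       (PySem.List.pyRange 1 (38 + 1) 1).foldl (fun d n => d.insert n none) PySem.Dict.empty)
      n 60 (by norm_num)
  obtain ⟨-, h120b, -⟩ :=
    pv_inv (PySem.List.len draws) draws 0
      ((PySem.List.pyRange 1 (38 + 1) 1).foldl (fun d n => d.insert n 0) PySem.Dict.empty,
       ([30, 60, 120] : List Int).foldl
         (fun d w => d.insert w ((PySem.List.pyRange 1 (38 + 1) 1).foldl
           (fun d' n => d'.insert n 0) PySem.Dict.empty)) PySem.Dict.empty,
       (PySem.List.pyRange 1 (38 + 1) 1).foldl (fun d n => d.insert n none) PySem.Dict.empty)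
      n 120 (by norm_num)
  rw [h30a, h30b, h60b, h120b, h30c]
  rw [pv_recent_eq30, pv_recent_eq60, pv_recent_eq120]
  rw [pv_counts0, pv_last0, pv_recent0 30 n (by norm_num), pv_recent0 60 n (by norm_num),
      pv_recent0 120 n (by norm_num)]
  rw [pv_foldl_last (fun p => pvContains p.2 n) (fun p => p.1) (PySem.List.enumerate draws 0) none]
  simp only [Option.or_none, zero_add]
  rfl
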